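-- pv_equiv track=rewrite | github.com/jemg2030/Retos-Python-CheckIO | PYCON_TW/SumConsecutives.py | sum_consecutives
-- ===== SOURCE A (Python) =====
-- def sum_consecutives(a):
--     # your code here
--     if not a:
--         return []
--
--     result = [a[0]]
--     for i in range(1, len(a)):
--         if a[i] == a[i - 1]:
--             result[-1] += a[i]
--         else:
--             result.append(a[i])
--
--     return result
-- ===== SOURCE B (Python) =====
-- def _groups(a):
--     """Partition a into maximal runs of consecutive equal elements (groupby-style)."""
--     groups = []
--     cur = []
--     for x in a:
--         if cur and cur[-1] == x:
--             cur.append(x)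
--         else:
--             if cur:
--                 groups.append(cur)
--             cur = [x]
--     if cur:
--         groups.append(cur)
--     return groups
--
--
-- def sum_consecutives(a):
--     return [sum(g) for g in _groups(a)]
-- ===== Notes on version B (the rewrite author's own statement) =====
-- stated objective: alternative
-- what changed: B first partitions the list into maximal runs of equal consecutive elements (groupby-style grouping pass) and then sums each group in a comprehension, instead of A's single index loop that mutates the last accumulated sum in place.
import Mathlib
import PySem

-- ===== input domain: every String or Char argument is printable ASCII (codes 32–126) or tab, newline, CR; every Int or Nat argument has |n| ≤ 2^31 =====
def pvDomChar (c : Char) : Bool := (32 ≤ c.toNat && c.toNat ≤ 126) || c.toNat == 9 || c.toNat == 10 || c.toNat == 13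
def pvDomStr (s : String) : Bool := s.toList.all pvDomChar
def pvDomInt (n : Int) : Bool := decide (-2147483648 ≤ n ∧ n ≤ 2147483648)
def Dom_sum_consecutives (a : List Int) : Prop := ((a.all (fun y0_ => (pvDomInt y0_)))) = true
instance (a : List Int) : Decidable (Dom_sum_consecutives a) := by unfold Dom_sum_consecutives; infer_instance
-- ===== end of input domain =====

-- B groups the list into maximal runs of equal consecutive elements and sums each run,
-- instead of A's index loop mutating the last accumulated sum in place; same cost, different decomposition.

-- ===== PORT A =====
-- Python's in-place `+=` on the last element of the (always nonempty) result list
def pvSetLastAdd : List Int → Int → List Int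
  | [], _ => []                      -- unreachable: result is never empty
  | [x], v => [x + v]
  | x :: y :: t, v => x :: pvSetLastAdd (y :: t) v

-- indices i and i-1 are always in range, so the pyGetD default 0 is never used
def sum_consecutives (a : List Int) : List Int :=
  if a.isEmpty then []
  else
    (PySem.List.pyRange 1 a.length 1).foldl
      (fun result i =>
        if PySem.List.pyGetD a i 0 == PySem.List.pyGetD a (i - 1) 0 then
          pvSetLastAdd result (PySem.List.pyGetD a i 0)
        else
          result ++ [PySem.List.pyGetD a i 0])
      [PySem.List.pyGetD a 0 0]

-- ===== PORT B =====
-- the loop of _groups in Source B: state (groups, cur)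
def pvGroupStep (s : List (List Int) × List Int) (x : Int) : List (List Int) × List Int :=
  if !s.2.isEmpty && s.2.getLast? == some x then (s.1, s.2 ++ [x])
  else ((if s.2.isEmpty then s.1 else s.1 ++ [s.2]), [x])

def pvGroups (a : List Int) : List (List Int) :=
  let s := a.foldl pvGroupStep ([], [])
  if s.2.isEmpty then s.1 else s.1 ++ [s.2]

-- sum(g)
def pvSumF (g : List Int) : Int := g.foldl (· + ·) 0

def sum_consecutives_alt (a : List Int) : List Int := (pvGroups a).map pvSumF

-- ===== PRECONDITION & SPEC =====
def Spec_sum_consecutives (a : List Int) (out : List Int) : Prop := out = sum_consecutives_alt a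
instance (a : List Int) (out : List Int) : Decidable (Spec_sum_consecutives a out) := by unfold Spec_sum_consecutives; infer_instance

-- ===== CLAIM (what is proved, stated in full; the proofs are below) =====
def Claim_equal_sum_consecutives : Prop := ∀ (a : List Int), Dom_sum_consecutives a → Spec_sum_consecutives a (sum_consecutives a)

-- ===== LEMMAS AND PROOFS =====

-- common abstract loop: prev = previous original element, res = run sums so far
def pvGo (prev : Int) (res : List Int) : List Int → List Int
  | [] => res
  | y :: ys => if y == prev then pvGo y (pvSetLastAdd res y) ys else pvGo y (res ++ [y]) ys

lemma pvSetLastAdd_append (l : List Int) (s v : Int) :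
    pvSetLastAdd (l ++ [s]) v = l ++ [s + v] := by
  induction l with
  | nil => simp [pvSetLastAdd]
  | cons x t ih =>
    cases t with
    | nil => simp [pvSetLastAdd]
    | cons y t' => simpa [pvSetLastAdd] using ih

lemma pvA_loop (suf : List Int) : ∀ (pre : List Int) (prev : Int) (res : List Int)
    (a : List Int), a = pre ++ prev :: suf →
    (PySem.List.pyRange ((pre.length : Int) + 1) (a.length : Int) 1).foldl
      (fun result i =>
        if PySem.List.pyGetD a i 0 == PySem.List.pyGetD a (i - 1) 0 then
          pvSetLastAdd result (PySem.List.pyGetD a i 0)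
        else
          result ++ [PySem.List.pyGetD a i 0]) res
    = pvGo prev res suf := by
  induction suf with
  | nil =>
    intro pre prev res a ha
    subst ha
    rw [PySem.List.pyRange_one_eq_nil (by simp)]
    simp [pvGo]
  | cons y ys ih =>
    intro pre prev res a ha
    have hlen : (a.length : Int) = (pre.length : Int) + 2 + (ys.length : Int) := by
      subst ha; push_cast [List.length_append, List.length_cons, List.length_nil]; omega
    rw [PySem.List.pyRange_one_cons (by rw [hlen]; omega)]
    have hy : PySem.List.pyGetD a ((pre.length : Int) + 1) 0 = y := by
      have : ((pre.length : Int) + 1) = ((pre ++ [prev]).length : Nat) := by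
        push_cast [List.length_append, List.length_cons, List.length_nil]; omega
      rw [this, PySem.List.pyGetD_natCast]
      subst ha
      have : pre ++ prev :: y :: ys = (pre ++ [prev]) ++ y :: ys := by simp
      rw [this]
      simp [List.getD]
    have hprev : PySem.List.pyGetD a ((pre.length : Int) + 1 - 1) 0 = prev := by
      have h1 : ((pre.length : Int) + 1 - 1) = ((pre.length : Nat) : Int) := by ring
      rw [h1, PySem.List.pyGetD_natCast]
      subst ha
      simp [List.getD]
    simp only [List.foldl_cons, hy, hprev]
    have hstep : ∀ res', (PySem.List.pyRange ((pre.length : Int) + 1 + 1) (a.length : Int) 1).foldl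
        (fun result i =>
          if PySem.List.pyGetD a i 0 == PySem.List.pyGetD a (i - 1) 0 then
            pvSetLastAdd result (PySem.List.pyGetD a i 0)
          else
            result ++ [PySem.List.pyGetD a i 0]) res' = pvGo y res' ys := by
      intro res'
      have hpre : ((pre.length : Int) + 1 + 1) = (((pre ++ [prev]).length : Nat) : Int) + 1 := by
        push_cast [List.length_append, List.length_cons, List.length_nil]; omega
      rw [hpre]
      exact ih (pre ++ [prev]) y res' a (by simp [ha])
    by_cases hyp : y = prev
    · subst hyp
      rw [hstep]
      simp [pvGo]
    · have hb : (y == prev) = false := by simp [hyp]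
      rw [hstep]
      simp [pvGo, hb]

lemma pvSumF_append_one (g : List Int) (y : Int) : pvSumF (g ++ [y]) = pvSumF g + y := by
  simp [pvSumF]

lemma pvB_loop (suf : List Int) : ∀ (groups : List (List Int)) (cur : List Int) (prev : Int),
    cur.getLast? = some prev →
    (let s := suf.foldl pvGroupStep (groups, cur)
     (if s.2.isEmpty then s.1 else s.1 ++ [s.2]).map pvSumF)
    = pvGo prev ((groups ++ [cur]).map pvSumF) suf := by
  induction suf with
  | nil =>
    intro groups cur prev hlast
    have hne : ¬ cur.isEmpty := by
      cases cur <;> simp_all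
    simp [pvGo, hne]
  | cons y ys ih =>
    intro groups cur prev hlast
    simp only [List.foldl_cons]
    by_cases hyp : y = prev
    · subst hyp
      have hne : ¬ cur.isEmpty := by cases cur <;> simp_all
      have hcond : pvGroupStep (groups, cur) y = (groups, cur ++ [y]) := by
        simp [pvGroupStep, hne, hlast]
      rw [hcond, ih groups (cur ++ [y]) y (by simp)]
      simp only [pvGo, beq_self_eq_true, if_true]
      congr 1
      simp [List.map_append, pvSetLastAdd_append, pvSumF_append_one]
    · have hne : ¬ cur.isEmpty := by cases cur <;> simp_all
      have hcond : pvGroupStep (groups, cur) y = (groups ++ [cur], [y]) := by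
        have hfalse : (cur.getLast? == some y) = false := by
          simp [hlast]; exact fun h => hyp h.symm
        simp [pvGroupStep, hne, hfalse]
      rw [hcond, ih (groups ++ [cur]) [y] y (by simp)]
      have hb : (y == prev) = false := by simp [hyp]
      simp only [pvGo, hb, Bool.false_eq_true, if_false]
      congr 1
      simp [pvSumF]

lemma pv_main (a : List Int) : sum_consecutives a = sum_consecutives_alt a := by
  cases a with
  | nil => simp [sum_consecutives, sum_consecutives_alt, pvGroups]
  | cons x xs =>
    have hA : sum_consecutives (x :: xs) = pvGo x [x] xs := by
      unfold sum_consecutives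
      rw [if_neg (by simp)]
      have h0 : PySem.List.pyGetD (x :: xs) 0 0 = x := PySem.List.pyGetD_zero_cons x xs 0
      rw [h0]
      have := pvA_loop xs [] x [x] (x :: xs) (by simp)
      simpa using this
    have hB : sum_consecutives_alt (x :: xs) = pvGo x [x] xs := by
      unfold sum_consecutives_alt pvGroups
      simp only [List.foldl_cons]
      have hfirst : pvGroupStep ([], []) x = ([], [x]) := by
        simp [pvGroupStep]
      rw [hfirst]
      have := pvB_loop xs [] [x] x (by simp)
      simp only at this
      rw [this]
      simp [pvSumF]
    rw [hA, hB]

-- ===== VERDICT (by name: the statement is the Claim_ definition above) =====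
theorem sum_consecutives_spec : Claim_equal_sum_consecutives := by
  intro a _
  unfold Spec_sum_consecutives
  exact pv_main a
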